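-- pv_equiv track=rewrite | github.com/javadkavossi/Intersecting-Two-Posting-Lists-algorithm | intersect.py | create_word_dictionary
-- ===== SOURCE A (Python) =====
-- def create_word_dictionary(file1_words, file2_words):
--     word_dictionary = {}
--
--     for word in file1_words:
--         if word in word_dictionary:
--             word_dictionary[word].append("file1.txt")
--         else:
--             word_dictionary[word] = ["file1.txt"]
--
--     for word in file2_words:
--         if word in word_dictionary:
--             word_dictionary[word].append("file2.txt")
--         else:
--             word_dictionary[word] = ["file2.txt"]
--
--     return word_dictionary
-- ===== SOURCE B (Python) =====
-- def create_word_dictionary(file1_words, file2_words):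
--     unique1 = list(dict.fromkeys(file1_words))
--     unique2 = list(dict.fromkeys(file2_words))
--     result = {w: ["file1.txt"] * file1_words.count(w) for w in unique1}
--     for w in unique2:
--         occurrences = ["file2.txt"] * file2_words.count(w)
--         if w in result:
--             result[w] = result[w] + occurrences
--         else:
--             result[w] = occurrences
--     return result
-- ===== Notes on version B (the rewrite author's own statement) =====
-- stated objective: alternative
-- what changed: B first deduplicates each file's word list (dict.fromkeys), then builds every value list at once as ['fileN.txt']*count per unique word, instead of A's per-occurrence append into the dict.
import Mathlib
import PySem

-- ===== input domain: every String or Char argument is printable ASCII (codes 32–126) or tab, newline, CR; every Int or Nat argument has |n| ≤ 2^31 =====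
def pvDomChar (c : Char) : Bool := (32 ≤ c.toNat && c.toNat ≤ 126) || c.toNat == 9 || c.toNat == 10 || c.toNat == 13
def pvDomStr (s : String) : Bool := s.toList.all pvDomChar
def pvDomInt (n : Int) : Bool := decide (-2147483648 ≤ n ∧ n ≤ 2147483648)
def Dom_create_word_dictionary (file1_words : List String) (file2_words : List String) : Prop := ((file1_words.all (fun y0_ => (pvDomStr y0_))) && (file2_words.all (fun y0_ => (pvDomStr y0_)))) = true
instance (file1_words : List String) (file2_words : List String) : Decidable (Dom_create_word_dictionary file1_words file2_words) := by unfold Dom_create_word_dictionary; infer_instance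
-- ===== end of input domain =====

-- B builds each value list at once as label*count per unique word of the deduplicated lists,
-- instead of A's per-occurrence label append; objective: alternative decomposition (not faster).

-- ===== PORT A =====
-- 'word in word_dictionary' → contains; 'word_dictionary[word].append(lbl)' → insert of (current value ++ [lbl]),
-- where the current value of the present key is getD word [].
def create_word_dictionary (file1_words : List String) (file2_words : List String) : List (String × List String) :=
  let word_dictionary : PySem.Dict String (List String) := PySem.Dict.empty
  let word_dictionary := file1_words.foldl (fun d w =>
    if d.contains w then d.insert w (d.getD w [] ++ ["file1.txt"])
    else d.insert w ["file1.txt"]) word_dictionary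
  let word_dictionary := file2_words.foldl (fun d w =>
    if d.contains w then d.insert w (d.getD w [] ++ ["file2.txt"])
    else d.insert w ["file2.txt"]) word_dictionary
  word_dictionary.items

-- ===== PORT B =====
-- list(dict.fromkeys(xs)) → PySem.List.dedup; ['lbl'] * xs.count(w) → pyRepeat; the dict
-- comprehension and the second loop are the two folds below.
def create_word_dictionary_alt (file1_words : List String) (file2_words : List String) : List (String × List String) :=
  let unique1 := PySem.List.dedup file1_words
  let unique2 := PySem.List.dedup file2_words
  let result : PySem.Dict String (List String) := unique1.foldl (fun d w =>
    d.insert w (PySem.List.pyRepeat ["file1.txt"] (PySem.List.count file1_words w : Int))) PySem.Dict.empty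
  let result := unique2.foldl (fun d w =>
    if d.contains w then d.insert w (d.getD w [] ++ PySem.List.pyRepeat ["file2.txt"] (PySem.List.count file2_words w : Int))
    else d.insert w (PySem.List.pyRepeat ["file2.txt"] (PySem.List.count file2_words w : Int))) result
  result.items

-- ===== PRECONDITION & SPEC =====
def Spec_create_word_dictionary (file1_words : List String) (file2_words : List String) (out : List (String × List String)) : Prop := out = create_word_dictionary_alt file1_words file2_words
instance (file1_words : List String) (file2_words : List String) (out : List (String × List String)) : Decidable (Spec_create_word_dictionary file1_words file2_words out) := by unfold Spec_create_word_dictionary; infer_instance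

-- ===== CLAIM (what is proved, stated in full; the proofs are below) =====
def Claim_equal_create_word_dictionary : Prop := ∀ (file1_words : List String) (file2_words : List String), Dom_create_word_dictionary file1_words file2_words → Spec_create_word_dictionary file1_words file2_words (create_word_dictionary file1_words file2_words)

-- ===== LEMMAS AND PROOFS =====

-- the 'if w in d: append else: set' step is one insert of (old value ++ new occurrences)
theorem fold_if_eq_fold_insert (l : List String) (occ : String → List String)
    (d : PySem.Dict String (List String)) :
    l.foldl (fun d w =>
      if d.contains w then d.insert w (d.getD w [] ++ occ w)
      else d.insert w (occ w)) d
    = l.foldl (fun d w => d.insert w (d.getD w [] ++ occ w)) d := by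
  congr 1
  funext d w
  cases h : d.contains w
  · simp [PySem.Dict.getD_of_not_contains, h]
  · simp

-- A's per-occurrence append loop, lookup-wise
theorem getD_fold_append_one (l : List String) (lbl : String)
    (d : PySem.Dict String (List String)) (c : String) :
    (l.foldl (fun d w => d.insert w (d.getD w [] ++ [lbl])) d).getD c []
      = d.getD c [] ++ List.replicate (l.count c) lbl := by
  induction l generalizing d with
  | nil => simp
  | cons w t ih =>
    rw [List.foldl_cons, ih, PySem.Dict.getD_insert]
    by_cases hc : c = w
    · subst hc
      simp [List.replicate_succ, List.append_assoc]
    · have hw : ¬ w = c := fun h => hc h.symm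
      simp [hc, hw]

-- a fold inserting a value depending only on the key
theorem getD_fold_const (l : List String) (f : String → List String)
    (d : PySem.Dict String (List String)) (c : String) :
    (l.foldl (fun d w => d.insert w (f w)) d).getD c []
      = if c ∈ l then f c else d.getD c [] := by
  induction l generalizing d with
  | nil => simp
  | cons w t ih =>
    simp only [List.foldl_cons, ih, List.mem_cons]
    by_cases ht : c ∈ t
    · simp [ht]
    · by_cases hc : c = w <;> simp [ht, hc, PySem.Dict.getD_insert]

-- an appending fold over a duplicate-free list touches each key once
theorem getD_fold_append_nodup (l : List String) (occ : String → List String)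
    (hl : l.Nodup) (d : PySem.Dict String (List String)) (c : String) :
    (l.foldl (fun d w => d.insert w (d.getD w [] ++ occ w)) d).getD c []
      = if c ∈ l then d.getD c [] ++ occ c else d.getD c [] := by
  induction l generalizing d with
  | nil => simp
  | cons w t ih =>
    obtain ⟨hw, ht⟩ := List.nodup_cons.mp hl
    simp only [List.foldl_cons, ih ht, List.mem_cons]
    by_cases hct : c ∈ t
    · have hcw : ¬ (c = w) := fun h => hw (h ▸ hct)
      simp [hct, hcw, PySem.Dict.getD_insert]
    · by_cases hc : c = w <;> simp [hct, hc, hw, PySem.Dict.getD_insert]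

theorem pv_getD_A (f1 f2 : List String) (c : String) :
    ((f2.foldl (fun d w => d.insert w (d.getD w [] ++ ["file2.txt"]))
        (f1.foldl (fun d w => d.insert w (d.getD w [] ++ ["file1.txt"]))
          (PySem.Dict.empty : PySem.Dict String (List String)))).getD c [])
      = List.replicate (f1.count c) "file1.txt" ++ List.replicate (f2.count c) "file2.txt" := by
  rw [getD_fold_append_one, getD_fold_append_one]
  simp

theorem pv_getD_B (f1 f2 : List String) (c : String) :
    (((PySem.List.dedup f2).foldl (fun d w => d.insert w (d.getD w [] ++ PySem.List.pyRepeat ["file2.txt"] (PySem.List.count f2 w : Int)))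
        ((PySem.List.dedup f1).foldl (fun d w => d.insert w (PySem.List.pyRepeat ["file1.txt"] (PySem.List.count f1 w : Int)))
          (PySem.Dict.empty : PySem.Dict String (List String)))).getD c [])
      = List.replicate (f1.count c) "file1.txt" ++ List.replicate (f2.count c) "file2.txt" := by
  rw [getD_fold_append_nodup _ _ (PySem.List.nodup_dedup f2), getD_fold_const]
  simp only [PySem.List.mem_dedup, PySem.List.pyRepeat_singleton, PySem.List.count_eq,
    Int.toNat_natCast, PySem.Dict.getD_empty]
  by_cases h1 : c ∈ f1 <;> by_cases h2 : c ∈ f2 <;>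
    simp [h1, h2, List.count_eq_zero_of_not_mem]

-- updating a seen-set with dedup xs is updating it with xs
theorem update_dedup (s : List String) (x : List String) :
    PySem.Set.update s (PySem.List.dedup x) = PySem.Set.update s x := by
  rw [PySem.List.dedup_eq_ofList, PySem.Set.update_eq_append_filter,
    PySem.Set.update_eq_append_filter, PySem.Set.ofList_ofList]

-- ===== VERDICT (by name: the statement is the Claim_ definition above) =====
theorem create_word_dictionary_spec : Claim_equal_create_word_dictionary := by
  intro f1 f2 _
  unfold Spec_create_word_dictionary create_word_dictionary create_word_dictionary_alt
  simp only [fold_if_eq_fold_insert]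
  set dA := f2.foldl (fun d w => d.insert w (d.getD w [] ++ ["file2.txt"]))
      (f1.foldl (fun d w => d.insert w (d.getD w [] ++ ["file1.txt"]))
        (PySem.Dict.empty : PySem.Dict String (List String))) with hdA
  set dB := (PySem.List.dedup f2).foldl (fun d w => d.insert w (d.getD w [] ++ PySem.List.pyRepeat ["file2.txt"] (PySem.List.count f2 w : Int)))
      ((PySem.List.dedup f1).foldl (fun d w => d.insert w (PySem.List.pyRepeat ["file1.txt"] (PySem.List.count f1 w : Int)))
        (PySem.Dict.empty : PySem.Dict String (List String))) with hdB
  have hndA : dA.keys.Nodup := by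
    rw [hdA]
    apply PySem.Dict.nodup_keys_foldl_insert
    apply PySem.Dict.nodup_keys_foldl_insert
    exact PySem.Dict.nodup_keys_empty
  have hndB : dB.keys.Nodup := by
    rw [hdB]
    apply PySem.Dict.nodup_keys_foldl_insert
    apply PySem.Dict.nodup_keys_foldl_insert
    exact PySem.Dict.nodup_keys_empty
  have hkeys : dA.keys = dB.keys := by
    rw [hdA, hdB, PySem.Dict.keys_foldl_insert, PySem.Dict.keys_foldl_insert,
      PySem.Dict.keys_foldl_insert, PySem.Dict.keys_foldl_insert, PySem.Dict.keys_empty,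
      update_dedup, update_dedup]
  rw [PySem.Dict.items_eq_map_keys dA hndA [], PySem.Dict.items_eq_map_keys dB hndB [], hkeys]
  refine List.map_congr_left ?_
  intro k _
  rw [hdA, hdB, pv_getD_A, pv_getD_B]
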